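-- pv_equiv track=rewrite | github.com/tkgaolol/brushcode_juejin | 29.py | solution
-- ===== SOURCE A (Python) =====
-- def solution(s: str, k: int) -> str:
--     # Create transformation rules using a dictionary
--     rules = {
--         'a': 'bc',
--         'b': 'ca',
--         'c': 'ab'
--     }
--
--     # Perform the transformation k times
--     for _ in range(k):
--         # Transform each character and join them together
--         s = ''.join(rules[c] for c in s)
--
--     return s
-- ===== SOURCE B (Python) =====
-- def solution(s: str, k: int) -> str:
--     rules = {
--         'a': 'bc',
--         'b': 'ca',
--         'c': 'ab'
--     }
--
--     def expand(c, d):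
--         # depth 0 (or a negative k): the character stays as it is
--         if d <= 0:
--             return c
--         return ''.join(expand(x, d - 1) for x in rules[c])
--
--     return ''.join(expand(c, k) for c in s)
-- ===== Notes on version B (the rewrite author's own statement) =====
-- stated objective: alternative
-- what changed: Replaces k sequential whole-string rewriting passes with a per-character recursion expand(c, d) on expansion depth, joining the independent expansions of the original characters once.
import Mathlib
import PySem

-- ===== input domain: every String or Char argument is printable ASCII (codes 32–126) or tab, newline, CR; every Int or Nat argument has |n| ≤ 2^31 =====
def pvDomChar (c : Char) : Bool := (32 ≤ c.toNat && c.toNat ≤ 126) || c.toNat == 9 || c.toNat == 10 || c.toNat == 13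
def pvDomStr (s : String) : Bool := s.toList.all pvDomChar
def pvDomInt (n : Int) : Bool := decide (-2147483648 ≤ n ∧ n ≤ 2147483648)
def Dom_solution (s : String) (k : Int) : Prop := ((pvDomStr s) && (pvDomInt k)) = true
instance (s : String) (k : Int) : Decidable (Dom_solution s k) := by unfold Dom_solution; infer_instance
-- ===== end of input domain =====

-- B changes the decomposition: per-character recursion on expansion depth instead of k whole-string passes; same cost.

-- ===== PORT A =====
-- the rules dict, written verbatim in both Pythons
def pvRules : PySem.Dict Char String := ⟨[('a', "bc"), ('b', "ca"), ('c', "ab")]⟩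

-- rules[c]; the KeyError case (get? = none) is excluded by Pre_solution, so the "" default is never reached there
def pvRulesGet (c : Char) : String := (pvRules.get? c).getD ""

-- 'for _ in range(k): s = ''.join(rules[c] for c in s)' (range(k) makes max(k,0) = k.toNat passes)
def pvLoopA : Nat → String → String
  | 0, s => s
  | n + 1, s => pvLoopA n (PySem.Str.join "" (s.toList.map (fun c => pvRulesGet c)))

def solution (s : String) (k : Int) : String := pvLoopA k.toNat s

-- ===== PORT B =====
-- expand(c, d): the 'd <= 0' base case is ported through the Nat depth k.toNat (= 0 exactly when k ≤ 0)
def pvExpand : Nat → Char → String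
  | 0, c => c.toString
  | d + 1, c => PySem.Str.join "" ((pvRulesGet c).toList.map (fun x => pvExpand d x))

def solution_alt (s : String) (k : Int) : String :=
  PySem.Str.join "" (s.toList.map (fun c => pvExpand k.toNat c))

-- ===== PRECONDITION & SPEC =====
-- Pre_ excludes exactly the inputs where the Python A raises KeyError: k ≥ 1 together with a
-- character of s outside {'a','b','c'} (Python B raises there too).
def Pre_solution (s : String) (k : Int) : Prop :=
  k ≤ 0 ∨ (s.toList.all (fun c => c == 'a' || c == 'b' || c == 'c')) = true
instance (s : String) (k : Int) : Decidable (Pre_solution s k) := by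
  unfold Pre_solution; infer_instance

def pvWitness_solution : String × Int := ("abc", 3)

def Spec_solution (s : String) (k : Int) (out : String) : Prop := out = solution_alt s k
instance (s : String) (k : Int) (out : String) : Decidable (Spec_solution s k out) := by
  unfold Spec_solution; infer_instance

-- ===== CLAIM (what is proved, stated in full; the proofs are below) =====
def Claim_equal_solution : Prop :=
  ∀ (s : String) (k : Int), Dom_solution s k → Pre_solution s k → Spec_solution s k (solution s k)

-- ===== LEMMAS AND PROOFS =====

theorem pv_join_nil_flatten (l : List (List Char)) : PySem.Chars.join [] l = l.flatten := by
  induction l with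
  | nil => simp [PySem.Chars.join_nil]
  | cons a t ih =>
    cases t with
    | nil => simp [PySem.Chars.join_singleton]
    | cons b r => rw [PySem.Chars.join_cons_cons]; simp_all

-- ''.join over a mapped list, read as a flatMap on the character level
theorem pv_toList_joinF (f : Char → String) (cs : List Char) :
    (PySem.Str.join "" (cs.map (fun c => f c))).toList = cs.flatMap (fun c => (f c).toList) := by
  rw [PySem.Str.toList_join]
  show PySem.Chars.join [] _ = _
  rw [pv_join_nil_flatten, List.map_map, List.flatMap_def]
  rfl

theorem pv_expand_succ_toList (d : Nat) (c : Char) :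
    (pvExpand (d + 1) c).toList = (pvRulesGet c).toList.flatMap (fun x => (pvExpand d x).toList) := by
  show (PySem.Str.join "" ((pvRulesGet c).toList.map (fun x => pvExpand d x))).toList = _
  exact pv_toList_joinF (fun x => pvExpand d x) (pvRulesGet c).toList

-- the heart of the equivalence: n rewriting passes over s equal joining the depth-n expansions
theorem pv_loop_eq (n : Nat) (s : String) :
    pvLoopA n s = PySem.Str.join "" (s.toList.map (fun c => pvExpand n c)) := by
  induction n generalizing s with
  | zero =>
    apply String.toList_inj.mp
    rw [pv_toList_joinF]
    show s.toList = s.toList.flatMap (fun c => (Char.toString c).toList)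
    simp
  | succ n ih =>
    show pvLoopA n (PySem.Str.join "" (s.toList.map (fun c => pvRulesGet c))) = _
    rw [ih]
    apply String.toList_inj.mp
    rw [pv_toList_joinF, pv_toList_joinF]
    rw [pv_toList_joinF]
    rw [List.flatMap_assoc]
    exact List.flatMap_congr (fun c _ => (pv_expand_succ_toList n c).symm)

-- ===== VERDICT (by name: the statement is the Claim_ definition above) =====
theorem solution_spec : Claim_equal_solution := by
  intro s k _ _
  show solution s k = solution_alt s k
  exact pv_loop_eq k.toNat s
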